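-- pv_equiv track=rewrite | github.com/MeftohuAhmed/Facebook | Feature5.py | flag_words
-- ===== SOURCE A (Python) =====
-- def flag_words(S,W):
--     """
--     This function checks if the word W can be formed by repeating characters in the word S.
--     A character repetition is considered significant if it occurs at least 3 times.
--     Characters repeated less than 3 times are ignored in the detection process.
--
--     Parameters:
--     S (str): The word in which to search for repeated characters.
--     W (str): The word to be formed by repeating characters in S.
--
--     Returns:
--     bool: True if W can be formed by repeating characters in S, False otherwise.
--     """
--     # Edge case: None inputs
--     if S is None or W is None:
--         return False
--
--     # Edge case: both words are the same
--     if S == W: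
--         return False
--
--     # Input validation
--     if not isinstance(S, str) or not isinstance(W, str):
--         raise ValueError("Both inputs must be strings")
--
--     # Edge case: non-alphabetic characters
--     if not S.isalpha() or not W.isalpha():
--         return False
--
--     def repeated_letters(s, ind):
--         temp = ind
--         while temp < len(s) and s[temp] == s[ind]:
--             temp += 1
--         return temp - ind
--
--     if not S and not W:
--         return False
--
--     i, j = 0, 0
--     while i < len(S) and j < len(W):
--         if S[i] == W[j]:
--             len1 = repeated_letters(S, i)
--             len2 = repeated_letters(W, j)
--             if (len1 < 3 and len1 != len2) or (len1 >= 3 and len1 <= len2):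
--                 return False
--             i += len1
--             j += len2
--         else:
--             return False
--     return i == len(S) and j == len(W)
-- ===== SOURCE B (Python) =====
-- def flag_words(S, W):
--     # Same leading guards as the original.
--     if S is None or W is None:
--         return False
--     if S == W:
--         return False
--     if not isinstance(S, str) or not isinstance(W, str):
--         raise ValueError("Both inputs must be strings")
--     if not S.isalpha() or not W.isalpha():
--         return False
--     if not S and not W:
--         return False
--
--     def _runs(s):
--         runs = []
--         prev = None
--         count = 0
--         for ch in s:
--             if ch == prev:
--                 count += 1
--             else:
--                 if prev is not None:
--                     runs.append((prev, count))
--                 prev, count = ch, 1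
--         if prev is not None:
--             runs.append((prev, count))
--         return runs
--
--     gS = _runs(S)
--     gW = _runs(W)
--     if len(gS) != len(gW):
--         return False
--     for (c1, n1), (c2, n2) in zip(gS, gW):
--         if c1 != c2 or (n1 < 3 and n1 != n2) or (n1 >= 3 and n1 <= n2):
--             return False
--     return True
-- ===== Notes on version B (the rewrite author's own statement) =====
-- stated objective: idiomatic
-- what changed: Replaces the interleaved two-pointer walk with inner rescanning helpers by one single-pass run-length encoding of each string followed by a zip over the two run tables.
import Mathlib
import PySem

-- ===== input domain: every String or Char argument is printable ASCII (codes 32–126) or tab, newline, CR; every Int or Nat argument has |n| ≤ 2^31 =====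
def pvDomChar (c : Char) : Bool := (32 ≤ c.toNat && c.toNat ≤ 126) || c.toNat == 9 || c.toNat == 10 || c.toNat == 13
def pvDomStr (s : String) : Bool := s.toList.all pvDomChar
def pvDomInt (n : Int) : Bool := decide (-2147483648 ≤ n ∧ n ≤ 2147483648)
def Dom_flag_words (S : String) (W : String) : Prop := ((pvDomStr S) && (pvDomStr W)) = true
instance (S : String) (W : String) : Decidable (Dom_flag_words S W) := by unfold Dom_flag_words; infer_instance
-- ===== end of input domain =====

-- B replaces A's interleaved two-pointer walk by a single-pass run-length table per string,
-- zipped and compared; same return value everywhere (objective: idiomatic decomposition).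

-- ===== PORT A =====
-- repeated_letters(s, ind): length of the run of s[ind] starting at ind; here `c` is s[ind]
-- and the list is the suffix after position ind.
def pvRepLetters (c : Char) : List Char → Nat
  | [] => 0
  | d :: rest => if d = c then pvRepLetters c rest + 1 else 0

-- the two-pointer while-loop of A, on the remaining suffixes of S and W
def pvFlagLoop : List Char → List Char → Bool
  | c :: s', d :: w' =>
    if c = d then
      let l1 := pvRepLetters c s' + 1
      let l2 := pvRepLetters d w' + 1
      if (l1 < 3 && l1 ≠ l2) || (3 ≤ l1 && l1 ≤ l2) then false
      else pvFlagLoop (s'.drop (pvRepLetters c s')) (w'.drop (pvRepLetters d w'))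
    else false
  | s, w => s.isEmpty && w.isEmpty
termination_by s w => s.length
decreasing_by simp only [List.length_drop, List.length_cons]; omega

def flag_words (S : String) (W : String) : Bool :=
  -- 'S is None or W is None' and the isinstance check cannot fire for String arguments
  if S == W then false
  else if !(PySem.Str.strIsalpha S) || !(PySem.Str.strIsalpha W) then false
  else if S.toList.isEmpty && W.toList.isEmpty then false
  else pvFlagLoop S.toList W.toList

-- ===== PORT B =====
-- _runs(s): single forward pass with (runs, prev, count) accumulator
def pvRunsFold (l : List Char) : List (Char × Nat) :=
  let st := l.foldl
    (fun (st : List (Char × Nat) × Option Char × Nat) ch =>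
      if some ch = st.2.1 then (st.1, st.2.1, st.2.2 + 1)
      else
        match st.2.1 with
        | none => (st.1, some ch, 1)
        | some p => (st.1 ++ [(p, st.2.2)], some ch, 1))
    ([], none, 0)
  match st with
  | (runs, none, _) => runs
  | (runs, some p, count) => runs ++ [(p, count)]

def flag_words_alt (S : String) (W : String) : Bool :=
  if S == W then false
  else if !(PySem.Str.strIsalpha S) || !(PySem.Str.strIsalpha W) then false
  else if S.toList.isEmpty && W.toList.isEmpty then false
  else
    let gS := pvRunsFold S.toList
    let gW := pvRunsFold W.toList
    if gS.length ≠ gW.length then false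
    else (gS.zip gW).all fun p =>
      (p.1.1 = p.2.1 : Bool) &&
      !((p.1.2 < 3 && p.1.2 ≠ p.2.2) || (3 ≤ p.1.2 && p.1.2 ≤ p.2.2))

-- ===== PRECONDITION & SPEC =====
def Spec_flag_words (S : String) (W : String) (out : Bool) : Prop := out = flag_words_alt S W
instance (S : String) (W : String) (out : Bool) : Decidable (Spec_flag_words S W out) := by unfold Spec_flag_words; infer_instance

-- ===== CLAIM (what is proved, stated in full; the proofs are below) =====
def Claim_equal_flag_words : Prop := ∀ (S : String) (W : String), Dom_flag_words S W → Spec_flag_words S W (flag_words S W)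

-- ===== LEMMAS AND PROOFS =====

-- recursive characterisation of the run-length table
def pvRunsR : List Char → List (Char × Nat)
  | c :: rest => (c, pvRepLetters c rest + 1) :: pvRunsR (rest.drop (pvRepLetters c rest))
  | [] => []
termination_by l => l.length
decreasing_by simp only [List.length_drop, List.length_cons]; omega

-- tail of the fold starting from an open run (p, c)
def pvRunsAux (p : Char) (c : Nat) : List Char → List (Char × Nat)
  | [] => [(p, c)]
  | d :: rest => if d = p then pvRunsAux p (c + 1) rest else (p, c) :: pvRunsAux d 1 rest

lemma pvRunsAux_eq (l : List Char) (p : Char) (c : Nat) :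
    pvRunsAux p c l = (p, c + pvRepLetters p l) :: pvRunsR (l.drop (pvRepLetters p l)) := by
  induction l generalizing p c with
  | nil => simp [pvRunsAux, pvRepLetters, pvRunsR]
  | cons d rest ih =>
    by_cases h : d = p
    · subst h
      rw [pvRunsAux, if_pos rfl, ih,
        show pvRepLetters d (d :: rest) = pvRepLetters d rest + 1 from by simp [pvRepLetters],
        List.drop_succ_cons]
      congr 2
      omega
    · simp only [pvRunsAux, if_neg h, pvRepLetters, Nat.add_zero, List.drop_zero]
      rw [ih]
      conv_rhs => rw [pvRunsR]
      simp [Nat.add_comm]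

lemma pvRunsFold_loop (l : List Char) (acc : List (Char × Nat)) (p : Char) (c : Nat) :
    (match l.foldl
      (fun (st : List (Char × Nat) × Option Char × Nat) ch =>
        if some ch = st.2.1 then (st.1, st.2.1, st.2.2 + 1)
        else
          match st.2.1 with
          | none => (st.1, some ch, 1)
          | some q => (st.1 ++ [(q, st.2.2)], some ch, 1))
      (acc, some p, c) with
     | (runs, none, _) => runs
     | (runs, some q, count) => runs ++ [(q, count)]) = acc ++ pvRunsAux p c l := by
  induction l generalizing acc p c with
  | nil => simp [pvRunsAux]
  | cons d rest ih =>
    by_cases h : d = p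
    · subst h
      simp only [List.foldl_cons, if_pos rfl, pvRunsAux]
      exact ih acc d (c + 1)
    · have h' : ¬ (some d = some p) := by simp [h]
      simp only [List.foldl_cons, if_neg h', pvRunsAux, if_neg h]
      rw [ih (acc ++ [(p, c)]) d 1]
      simp

lemma pvRunsFold_eq (l : List Char) : pvRunsFold l = pvRunsR l := by
  cases l with
  | nil => simp [pvRunsFold, pvRunsR]
  | cons d rest =>
    unfold pvRunsFold
    simp only [List.foldl_cons]
    have h0 : ¬ ((some d : Option Char) = none) := by simp
    simp only [if_neg h0]
    have hlp := pvRunsFold_loop rest [] d 1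
    simp only [List.nil_append] at hlp
    rw [hlp, pvRunsAux_eq]
    conv_rhs => rw [pvRunsR]
    simp [Nat.add_comm]

def pvBadPair (p : (Char × Nat) × Char × Nat) : Bool :=
  (p.1.1 = p.2.1 : Bool) &&
  !((p.1.2 < 3 && p.1.2 ≠ p.2.2) || (3 ≤ p.1.2 && p.1.2 ≤ p.2.2))

-- the two-pointer loop equals the zipped comparison of the recursive run tables
lemma pvFlagLoop_eq (s w : List Char) :
    pvFlagLoop s w =
      (decide ((pvRunsR s).length = (pvRunsR w).length) &&
        ((pvRunsR s).zip (pvRunsR w)).all pvBadPair) := by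
  suffices H : ∀ (n : Nat) (s w : List Char), s.length ≤ n → pvFlagLoop s w =
      (decide ((pvRunsR s).length = (pvRunsR w).length) &&
        ((pvRunsR s).zip (pvRunsR w)).all pvBadPair) from H s.length s w le_rfl
  intro n
  induction n with
  | zero =>
    intro s w hs
    have hs0 : s = [] := List.eq_nil_of_length_eq_zero (by omega)
    subst hs0
    cases w with
    | nil => simp [pvFlagLoop, pvRunsR]
    | cons d w' =>
      simp only [pvFlagLoop]
      conv_rhs => rw [pvRunsR]
      simp [pvRunsR]
  | succ n ih =>
    intro s w hs
    cases s with
    | nil =>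
      cases w with
      | nil => simp [pvFlagLoop, pvRunsR]
      | cons d w' =>
        simp only [pvFlagLoop]
        conv_rhs => rw [pvRunsR]
        simp [pvRunsR]
    | cons c s' =>
      cases w with
      | nil =>
        simp only [pvFlagLoop]
        conv_rhs => rw [pvRunsR]
        simp [pvRunsR]
      | cons d w' =>
        rw [pvFlagLoop]
        conv_rhs => rw [pvRunsR]; rw [pvRunsR]
        by_cases hcd : c = d
        · subst hcd
          simp only [if_pos rfl]
          by_cases hbad : ((pvRepLetters c s' + 1 < 3 && pvRepLetters c s' + 1 ≠ pvRepLetters c w' + 1) ||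
              (3 ≤ pvRepLetters c s' + 1 && pvRepLetters c s' + 1 ≤ pvRepLetters c w' + 1)) = true
          · rw [if_pos hbad]
            have hfirst : pvBadPair ((c, pvRepLetters c s' + 1), (c, pvRepLetters c w' + 1)) = false := by
              simp only [Bool.or_eq_true, Bool.and_eq_true, decide_eq_true_eq] at hbad
              simp only [pvBadPair, Bool.and_eq_false_iff, Bool.not_eq_true', Bool.or_eq_true,
                Bool.and_eq_true, decide_eq_true_eq, Bool.or_eq_false_iff,
                decide_eq_false_iff_not, ne_eq, Bool.not_eq_false']
              omega
            simp [hfirst]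
          · rw [if_neg hbad]
            rw [ih (s'.drop (pvRepLetters c s')) (w'.drop (pvRepLetters c w'))
              (by simp only [List.length_drop, List.length_cons] at hs ⊢; omega)]
            have hfirst : pvBadPair ((c, pvRepLetters c s' + 1), (c, pvRepLetters c w' + 1)) = true := by
              simp only [Bool.or_eq_true, Bool.and_eq_true, decide_eq_true_eq, not_or, not_and,
                ne_eq] at hbad
              simp only [pvBadPair, Bool.and_eq_true, decide_eq_true_eq, Bool.not_eq_true',
                Bool.or_eq_false_iff, Bool.and_eq_false_iff, decide_eq_false_iff_not, ne_eq,
                not_not]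
              exact ⟨trivial, by omega⟩
            have hlen : ((pvRunsR (List.drop (pvRepLetters c s') s')).length + 1 =
                (pvRunsR (List.drop (pvRepLetters c w') w')).length + 1) ↔
                ((pvRunsR (List.drop (pvRepLetters c s') s')).length =
                (pvRunsR (List.drop (pvRepLetters c w') w')).length) := by omega
            simp [hfirst, hlen]
        · simp only [if_neg hcd]
          simp only [List.zip_cons_cons, List.all_cons, pvBadPair]
          simp [hcd]

-- ===== VERDICT (by name: the statement is the Claim_ definition above) =====
theorem flag_words_spec : Claim_equal_flag_words := by
  intro S W _
  unfold Spec_flag_words flag_words flag_words_alt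
  split_ifs with h1 h2 h3
  · rfl
  · rfl
  · rfl
  · rw [pvFlagLoop_eq, pvRunsFold_eq, pvRunsFold_eq]
    by_cases hlen : (pvRunsR S.toList).length = (pvRunsR W.toList).length
    · rw [if_neg (not_not_intro hlen), decide_eq_true hlen, Bool.true_and]
      rfl
    · rw [if_pos hlen]
      simp [hlen]
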